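-- pv_equiv track=rewrite | github.com/lukaas33/lukaas33.github.io | public/webpages/algorithms/olympiade/storage/code/Weg.py | generateSquares
-- ===== SOURCE A (Python) =====
-- def generateSquares(r, c):
--     ''' Generate possible squares  '''
--     possible = []
--     for r1 in range(r):
--         r1 += 1
--         for r2 in range(r1, r):
--             r2 += 1
--             for c1 in range(c):
--                 c1 += 1
--                 for c2 in range(c1, c):
--                     c2 += 1
--                     possible.append((r1, r2, c1, c2))
--
--     return possible
-- ===== SOURCE B (Python) =====
-- def _pairs(vals):
--     """All ordered pairs (vals[i], vals[j]) with i < j."""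
--     out = []
--     while vals:
--         a, vals = vals[0], vals[1:]
--         out += [(a, b) for b in vals]
--     return out
--
--
-- def generateSquares(r, c):
--     ''' Generate possible squares  '''
--     row_pairs = _pairs(list(range(1, r + 1)))
--     if not row_pairs:
--         return []
--     col_pairs = _pairs(list(range(1, c + 1)))
--     if not col_pairs:
--         return []
--     return [rp + cp for rp in row_pairs for cp in col_pairs]
-- ===== Notes on version B (the rewrite author's own statement) =====
-- stated objective: idiomatic
-- what changed: Replaces the four nested index loops by recursively-built strict pair lists (combinations of rows and of columns), with the column pairs precomputed once and the result formed as the flattened product row-pairs x col-pairs.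
import Mathlib
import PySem

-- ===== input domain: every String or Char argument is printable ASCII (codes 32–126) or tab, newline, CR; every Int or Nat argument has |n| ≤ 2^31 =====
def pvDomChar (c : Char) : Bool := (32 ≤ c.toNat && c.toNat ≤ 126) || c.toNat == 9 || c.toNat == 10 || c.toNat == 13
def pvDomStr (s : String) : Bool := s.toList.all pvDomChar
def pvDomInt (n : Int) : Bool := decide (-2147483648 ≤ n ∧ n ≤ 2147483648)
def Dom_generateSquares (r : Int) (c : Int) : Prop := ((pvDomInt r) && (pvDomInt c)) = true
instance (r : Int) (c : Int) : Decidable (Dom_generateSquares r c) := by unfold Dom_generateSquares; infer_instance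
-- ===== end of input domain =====

-- B builds strict pair lists recursively (row pairs and column pairs, the latter once)
-- and returns their flattened product instead of A's four nested index loops; objective: idiomatic.

-- ===== PORT A =====
def generateSquares (r : Int) (c : Int) : List (Int × Int × Int × Int) :=
  (PySem.List.pyRange 0 r 1).foldl (fun acc i =>
    let r1 := i + 1
    (PySem.List.pyRange r1 r 1).foldl (fun acc j =>
      let r2 := j + 1
      (PySem.List.pyRange 0 c 1).foldl (fun acc k =>
        let c1 := k + 1
        (PySem.List.pyRange c1 c 1).foldl (fun acc l =>
          let c2 := l + 1
          acc ++ [(r1, r2, c1, c2)]) acc) acc) acc) []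

-- ===== PORT B =====
-- _pairs from Source B: all (vals[i], vals[j]) with i < j, recursively
def pvPairs : List Int → List (Int × Int)
  | [] => []
  | x :: xs => xs.map (fun b => (x, b)) ++ pvPairs xs

def generateSquares_alt (r : Int) (c : Int) : List (Int × Int × Int × Int) :=
  let rowPairs := pvPairs (PySem.List.pyRange 1 (r + 1) 1)
  if rowPairs = [] then [] else
  let colPairs := pvPairs (PySem.List.pyRange 1 (c + 1) 1)
  if colPairs = [] then [] else
  rowPairs.flatMap (fun rp => colPairs.map (fun cp => (rp.1, rp.2, cp.1, cp.2)))

-- ===== PRECONDITION & SPEC =====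
def Spec_generateSquares (r : Int) (c : Int) (out : List (Int × Int × Int × Int)) : Prop := out = generateSquares_alt r c
instance (r : Int) (c : Int) (out : List (Int × Int × Int × Int)) : Decidable (Spec_generateSquares r c out) := by unfold Spec_generateSquares; infer_instance

-- ===== CLAIM (what is proved, stated in full; the proofs are below) =====
def Claim_equal_generateSquares : Prop := ∀ (r : Int) (c : Int), Dom_generateSquares r c → Spec_generateSquares r c (generateSquares r c)

-- ===== LEMMAS AND PROOFS =====

-- shifting an integer range by one
theorem pvRange_shift (a b : Int) :
    PySem.List.pyRange (a + 1) (b + 1) 1 = (PySem.List.pyRange a b 1).map (· + 1) := by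
  simp only [PySem.List.pyRange_one, List.map_map]
  have : (b + 1 - (a + 1)).toNat = (b - a).toNat := by omega
  rw [this]
  apply List.map_congr_left
  intro k _
  simp [Function.comp]
  omega

-- pvPairs on a unit-step range is the nested strict enumeration
theorem pvPairs_pyRange (n : ℕ) : ∀ (a b : Int), (b - a).toNat = n →
    pvPairs (PySem.List.pyRange a b 1) =
      (PySem.List.pyRange a b 1).flatMap (fun i =>
        (PySem.List.pyRange (i + 1) b 1).map (fun j => (i, j))) := by
  induction n with
  | zero =>
    intro a b h
    rw [PySem.List.pyRange_one_eq_nil (by omega)]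
    simp [pvPairs]
  | succ m ih =>
    intro a b h
    rw [PySem.List.pyRange_one_cons (by omega)]
    simp only [pvPairs, List.flatMap_cons]
    rw [ih (a + 1) b (by omega)]

theorem pvPairs_pyRange' (a b : Int) :
    pvPairs (PySem.List.pyRange a b 1) =
      (PySem.List.pyRange a b 1).flatMap (fun i =>
        (PySem.List.pyRange (i + 1) b 1).map (fun j => (i, j))) :=
  pvPairs_pyRange (b - a).toNat a b rfl

theorem pvRange_shift' (a b : Int) :
    PySem.List.pyRange (a + 1 + 1) (b + 1) 1 = (PySem.List.pyRange (a + 1) b 1).map (· + 1) :=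
  pvRange_shift (a + 1) b

-- the early exits of B do not change its value
theorem alt_eq_flatMap (r c : Int) :
    generateSquares_alt r c =
      (pvPairs (PySem.List.pyRange 1 (r + 1) 1)).flatMap (fun rp =>
        (pvPairs (PySem.List.pyRange 1 (c + 1) 1)).map (fun cp => (rp.1, rp.2, cp.1, cp.2))) := by
  unfold generateSquares_alt
  simp only []
  split_ifs with h1 h2
  · rw [h1]; rfl
  · rw [h2]; simp
  · rfl

-- ===== VERDICT (by name: the statement is the Claim_ definition above) =====
theorem generateSquares_spec : Claim_equal_generateSquares := by
  intro r c _
  unfold Spec_generateSquares generateSquares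
  rw [alt_eq_flatMap]
  simp only [PySem.List.foldl_append_singleton_eq_map, PySem.List.foldl_append_eq_flatMap,
    List.nil_append]
  rw [pvPairs_pyRange', pvPairs_pyRange']
  have h1 : PySem.List.pyRange 1 (r + 1) 1 = (PySem.List.pyRange 0 r 1).map (· + 1) := by
    simpa using pvRange_shift 0 r
  have h2 : PySem.List.pyRange 1 (c + 1) 1 = (PySem.List.pyRange 0 c 1).map (· + 1) := by
    simpa using pvRange_shift 0 c
  rw [h1, h2]
  simp only [List.flatMap_map, List.map_map, List.flatMap_assoc, List.map_flatMap, Function.comp_def,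
    pvRange_shift']
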